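-- pv_equiv track=rewrite | github.com/05mengmeizi/pytorch | torch/distributed/pipelining/_utils.py | generate_stage_to_rank_mapping
-- ===== SOURCE A (Python) =====
-- def generate_stage_to_rank_mapping(
--     pp_size: int, num_stages: int, style: str = "loop"
-- ) -> dict[int, int]:
--     """
--     Compute the stage id to rank mapping for either a looped or V-style schedule.
--
--     Most commonly num_stages == pp_size * 2, but this function can be used to
--     compute the mapping for any number of stages per rank.
--     """
--     mapping = {}
--     if style == "loop":
--         for stage_index in range(num_stages):
--             mapping[stage_index] = stage_index % pp_size
--     elif style == "v":
--         if num_stages % pp_size != 0: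
--             raise ValueError(
--                 f"num_stages {num_stages} must be evenly divisible by pp_size {pp_size} for V schedules"
--             )
--
--         rank_index = 0
--         for stage_index in range(num_stages):
--             mapping[stage_index] = rank_index
--             # dont change rank if we are on the border (to keep v shape)
--             if (stage_index + 1) % pp_size == 0:
--                 continue
--             if (stage_index // pp_size) % 2 == 0:
--                 rank_index += 1
--             else:
--                 rank_index -= 1
--     else:
--         raise ValueError(f"Style {style} is not supported.")
--     return mapping
-- ===== SOURCE B (Python) =====
-- def generate_stage_to_rank_mapping(
--     pp_size: int, num_stages: int, style: str = "loop"
-- ) -> dict[int, int]: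
--     if style == "loop":
--         return {i: i % pp_size for i in range(num_stages)}
--     if style == "v":
--         if num_stages % pp_size != 0:
--             raise ValueError(
--                 f"num_stages {num_stages} must be evenly divisible by pp_size {pp_size} for V schedules"
--             )
--         fwd = list(range(pp_size))
--         bwd = list(reversed(fwd))
--         ranks = []
--         for b in range(num_stages // pp_size):
--             ranks += fwd if b % 2 == 0 else bwd
--         return dict(enumerate(ranks))
--     raise ValueError(f"Style {style} is not supported.")
-- ===== Notes on version B (the rewrite author's own statement) =====
-- stated objective: alternative
-- what changed: Replaces A's per-stage running rank_index accumulator with border-skip 'continue' logic by a block construction: the rank sequence is built block-by-block as range(pp_size) on even blocks and its reversal on odd blocks, then enumerated into the dict.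
-- outside the precondition, e.g. on generate_stage_to_rank_mapping(-3, 3, 'v'): A returns {0: 0, 1: 1, 2: 0}, B returns {}
import Mathlib
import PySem

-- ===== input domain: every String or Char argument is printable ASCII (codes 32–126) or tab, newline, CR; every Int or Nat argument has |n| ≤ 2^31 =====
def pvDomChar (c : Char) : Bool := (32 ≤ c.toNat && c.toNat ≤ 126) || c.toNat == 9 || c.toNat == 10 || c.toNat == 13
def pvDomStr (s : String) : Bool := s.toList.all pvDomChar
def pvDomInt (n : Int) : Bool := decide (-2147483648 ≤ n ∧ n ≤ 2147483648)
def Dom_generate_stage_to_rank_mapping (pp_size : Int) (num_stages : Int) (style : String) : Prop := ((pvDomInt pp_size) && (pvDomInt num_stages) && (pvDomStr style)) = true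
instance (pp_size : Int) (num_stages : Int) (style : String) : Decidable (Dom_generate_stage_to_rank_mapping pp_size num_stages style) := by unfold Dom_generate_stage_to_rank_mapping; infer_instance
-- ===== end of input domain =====

-- B replaces A's running rank_index accumulator by a block-by-block construction (forward block / reversed block, then enumerate); alternative decomposition, return-value equivalence.


-- ===== PORT A =====
def generate_stage_to_rank_mapping (pp_size : Int) (num_stages : Int) (style : String) : List (Int × Int) :=
  if style = "loop" then
    ((PySem.List.pyRange 0 num_stages 1).foldl
      (fun (m : PySem.Dict Int Int) i => m.insert i (PySem.Int.mod i pp_size))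
      PySem.Dict.empty).items
  else if style = "v" then
    if PySem.Int.mod num_stages pp_size ≠ 0 then []  -- raise ValueError (excluded by Pre_)
    else
      (((PySem.List.pyRange 0 num_stages 1).foldl
        (fun (st : PySem.Dict Int Int × Int) i =>
          let m := st.1.insert i st.2
          if PySem.Int.mod (i + 1) pp_size = 0 then (m, st.2)
          else if PySem.Int.mod (PySem.Int.floordiv i pp_size) 2 = 0 then (m, st.2 + 1)
          else (m, st.2 - 1))
        (PySem.Dict.empty, 0)).1).items
  else []  -- raise ValueError (excluded by Pre_)

-- ===== PORT B =====
def generate_stage_to_rank_mapping_alt (pp_size : Int) (num_stages : Int) (style : String) : List (Int × Int) :=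
  if style = "loop" then
    (PySem.List.pyRange 0 num_stages 1).map (fun i => (i, PySem.Int.mod i pp_size))
  else if style = "v" then
    if PySem.Int.mod num_stages pp_size ≠ 0 then []  -- raise ValueError (excluded by Pre_)
    else
      let fwd := PySem.List.pyRange 0 pp_size 1
      let bwd := fwd.reverse                        -- list(reversed(fwd))
      let ranks := (PySem.List.pyRange 0 (PySem.Int.floordiv num_stages pp_size) 1).foldl
        (fun (acc : List Int) b => acc ++ (if PySem.Int.mod b 2 = 0 then fwd else bwd)) []
      -- dict(enumerate(ranks))
      ((PySem.List.enumerate ranks 0).foldl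
        (fun (d : PySem.Dict Int Int) p => d.insert p.1 p.2) PySem.Dict.empty).items
  else []  -- raise ValueError (excluded by Pre_)

-- ===== PRECONDITION & SPEC =====
-- Pre_ excludes the inputs where Python A raises (unsupported style; non-divisible "v"; pp_size = 0 with
-- stages to iterate), and additionally "v" with pp_size < 0 and num_stages > 0 — a negative pipeline size
-- is outside the natural domain and A's zigzag walk there is an implementation accident B does not match.
def Pre_generate_stage_to_rank_mapping (pp_size : Int) (num_stages : Int) (style : String) : Prop :=
  (style = "loop" ∧ (pp_size ≠ 0 ∨ num_stages ≤ 0)) ∨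
  (style = "v" ∧ pp_size ≠ 0 ∧ PySem.Int.mod num_stages pp_size = 0 ∧ (0 < pp_size ∨ num_stages ≤ 0))
instance (pp_size : Int) (num_stages : Int) (style : String) : Decidable (Pre_generate_stage_to_rank_mapping pp_size num_stages style) := by unfold Pre_generate_stage_to_rank_mapping; infer_instance

def pvWitness_generate_stage_to_rank_mapping : Int × Int × String := (2, 4, "v")

def Spec_generate_stage_to_rank_mapping (pp_size : Int) (num_stages : Int) (style : String) (out : List (Int × Int)) : Prop := out = generate_stage_to_rank_mapping_alt pp_size num_stages style
instance (pp_size : Int) (num_stages : Int) (style : String) (out : List (Int × Int)) : Decidable (Spec_generate_stage_to_rank_mapping pp_size num_stages style out) := by unfold Spec_generate_stage_to_rank_mapping; infer_instance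

-- ===== CLAIM (what is proved, stated in full; the proofs are below) =====
def Claim_equal_generate_stage_to_rank_mapping : Prop := ∀ (pp_size : Int) (num_stages : Int) (style : String), Dom_generate_stage_to_rank_mapping pp_size num_stages style → Pre_generate_stage_to_rank_mapping pp_size num_stages style → Spec_generate_stage_to_rank_mapping pp_size num_stages style (generate_stage_to_rank_mapping pp_size num_stages style)

-- ===== LEMMAS AND PROOFS =====

-- the closed-form rank of stage i (ediv/emod form)
def vrank (pp i : Int) : Int := if (i / pp) % 2 = 0 then i % pp else pp - 1 - i % pp

lemma vstep (pp i : Int) (hpp : 0 < pp) :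
    (if (i + 1) % pp = 0 then vrank pp i
     else if (i / pp) % 2 = 0 then vrank pp i + 1 else vrank pp i - 1) = vrank pp (i + 1) := by
  have key := Int.mul_ediv_add_emod i pp
  set q := i / pp with hq
  set m := i % pp with hm
  have hm0 : 0 ≤ m := Int.emod_nonneg i (by omega)
  have hmlt : m < pp := Int.emod_lt_of_pos i hpp
  have h1 : i + 1 = (m + 1) + pp * q := by omega
  have hd : (i + 1) / pp = (m + 1) / pp + q := by rw [h1, Int.add_mul_ediv_left _ _ (by omega : pp ≠ 0)]
  have hr : (i + 1) % pp = (m + 1) % pp := by rw [h1, Int.add_mul_emod_self_left]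
  rcases eq_or_lt_of_le (by omega : m + 1 ≤ pp) with hb | hb
  · have hd1 : (m + 1) / pp = 1 := by rw [hb, Int.ediv_self (by omega)]
    have hr1 : (m + 1) % pp = 0 := by rw [hb, Int.emod_self]
    unfold vrank
    rw [hd, hd1, hr, hr1]
    have := Int.emod_two_eq q
    have := Int.emod_two_eq (q + 1)
    split_ifs <;> omega
  · have hd1 : (m + 1) / pp = 0 := Int.ediv_eq_zero_of_lt (by omega) hb
    have hr1 : (m + 1) % pp = m + 1 := Int.emod_eq_of_lt (by omega) hb
    unfold vrank
    rw [hd, hd1, hr, hr1]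
    have := Int.emod_two_eq q
    split_ifs <;> omega

-- A's v-loop, run over range(a, a+n) from a dict with no keys ≥ a and the correct running rank,
-- appends exactly the closed-form pairs.
lemma vfold (pp : Int) (hpp : 0 < pp) : ∀ (n : Nat) (a : Int), 0 ≤ a →
    ∀ (d : PySem.Dict Int Int), (∀ j : Int, a ≤ j → d.contains j = false) →
    ((PySem.List.pyRange a (a + n) 1).foldl
        (fun (st : PySem.Dict Int Int × Int) i =>
          let m := st.1.insert i st.2
          if PySem.Int.mod (i + 1) pp = 0 then (m, st.2)
          else if PySem.Int.mod (PySem.Int.floordiv i pp) 2 = 0 then (m, st.2 + 1)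
          else (m, st.2 - 1))
        (d, vrank pp a)).1.items
      = d.items ++ (PySem.List.pyRange a (a + n) 1).map (fun i => (i, vrank pp i)) := by
  intro n
  induction n with
  | zero =>
    intro a _ d _
    rw [PySem.List.pyRange_one_eq_nil (by omega)]
    simp
  | succ k ih =>
    intro a ha d hf
    rw [PySem.List.pyRange_one_cons (by push_cast; omega)]
    simp only [List.foldl_cons, List.map_cons]
    have hstep :
        (if PySem.Int.mod (a + 1) pp = 0 then ((d.insert a (vrank pp a)), vrank pp a)
         else if PySem.Int.mod (PySem.Int.floordiv a pp) 2 = 0 then ((d.insert a (vrank pp a)), vrank pp a + 1)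
         else ((d.insert a (vrank pp a)), vrank pp a - 1))
        = ((d.insert a (vrank pp a)), vrank pp (a + 1)) := by
      rw [PySem.Int.mod_eq_emod_of_pos hpp, PySem.Int.floordiv_eq_ediv_of_pos hpp,
          PySem.Int.mod_eq_emod_of_pos (by omega : (0:Int) < 2)]
      have := vstep pp a hpp
      split_ifs <;> simp_all
    have hrange : a + (k + 1 : Nat) = (a + 1) + (k : Nat) := by push_cast; omega
    have hf' : ∀ j : Int, a + 1 ≤ j → (d.insert a (vrank pp a)).contains j = false := by
      intro j hj
      rw [PySem.Dict.contains_insert]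
      have : (j == a) = false := by simp; omega
      rw [this, hf j (by omega)]
      rfl
    calc ((PySem.List.pyRange (a + 1) (a + (k + 1 : Nat)) 1).foldl _
            ((if PySem.Int.mod (a + 1) pp = 0 then ((d.insert a (vrank pp a)), vrank pp a)
              else if PySem.Int.mod (PySem.Int.floordiv a pp) 2 = 0 then ((d.insert a (vrank pp a)), vrank pp a + 1)
              else ((d.insert a (vrank pp a)), vrank pp a - 1)))).1.items
        = ((PySem.List.pyRange (a + 1) ((a + 1) + (k : Nat)) 1).foldl _
            ((d.insert a (vrank pp a)), vrank pp (a + 1))).1.items := by rw [hstep, hrange]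
      _ = (d.insert a (vrank pp a)).items ++ (PySem.List.pyRange (a + 1) ((a + 1) + (k : Nat)) 1).map (fun i => (i, vrank pp i)) :=
            ih (a + 1) (by omega) _ hf'
      _ = d.items ++ ((a, vrank pp a) :: (PySem.List.pyRange (a + 1) (a + (k + 1 : Nat)) 1).map (fun i => (i, vrank pp i))) := by
            rw [PySem.Dict.items_insert_of_not_contains _ _ (hf a (le_refl a)), hrange]
            simp

-- one block of B, enumerated starting at s = q*pp, is the closed-form pairs for stages s..s+pp-1
lemma vrank_block (pp q : Int) (hpp : 0 < pp) (k : Nat) (hk : k < pp.toNat) :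
    vrank pp (q * pp + (k : Int)) = if q % 2 = 0 then (k : Int) else pp - 1 - (k : Int) := by
  have hd : (q * pp + (k : Int)) / pp = q := by
    have e : q * pp + (k : Int) = (k : Int) + pp * q := by ring
    rw [e, Int.add_mul_ediv_left _ _ (by omega : pp ≠ 0),
        Int.ediv_eq_zero_of_lt (Int.natCast_nonneg k) (by omega)]
    omega
  have hm : (q * pp + (k : Int)) % pp = k := by
    have e : q * pp + (k : Int) = (k : Int) + pp * q := by ring
    rw [e, Int.add_mul_emod_self_left]
    exact Int.emod_eq_of_lt (Int.natCast_nonneg k) (by omega)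
  unfold vrank; rw [hd, hm]

lemma blockenum (pp q : Int) (hpp : 0 < pp) :
    PySem.List.enumerate
        (if q % 2 = 0 then PySem.List.pyRange 0 pp 1 else (PySem.List.pyRange 0 pp 1).reverse)
        (q * pp)
      = (PySem.List.pyRange (q * pp) (q * pp + pp) 1).map (fun i => (i, vrank pp i)) := by
  have hR : (PySem.List.pyRange 0 pp 1).length = pp.toNat := by
    rw [PySem.List.length_pyRange_one]; omega
  by_cases hq : q % 2 = 0
  · rw [if_pos hq]
    apply List.ext_getElem
    · rw [PySem.List.length_enumerate, hR, List.length_map, PySem.List.length_pyRange_one]; omega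
    · intro k h1 h2
      have hk : k < pp.toNat := by rw [PySem.List.length_enumerate, hR] at h1; exact h1
      rw [PySem.List.getElem_enumerate, List.getElem_map, PySem.List.getElem_pyRange_one,
          PySem.List.getElem_pyRange_one, vrank_block pp q hpp k hk, if_pos hq]
      simp
  · rw [if_neg hq]
    apply List.ext_getElem
    · rw [PySem.List.length_enumerate, List.length_reverse, hR, List.length_map,
          PySem.List.length_pyRange_one]; omega
    · intro k h1 h2
      have hk : k < pp.toNat := by
        rw [PySem.List.length_enumerate, List.length_reverse, hR] at h1; exact h1
      rw [PySem.List.getElem_enumerate, List.getElem_map, PySem.List.getElem_pyRange_one,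
          List.getElem_reverse, PySem.List.getElem_pyRange_one, vrank_block pp q hpp k hk, if_neg hq]
      simp only [Prod.mk.injEq]
      refine ⟨trivial, ?_⟩
      rw [hR]
      omega

-- B's block fold over q blocks enumerates to the closed-form pairs for stages 0..q*pp-1
lemma benum (pp : Int) (hpp : 0 < pp) : ∀ (q : Nat),
    PySem.List.enumerate
        (((PySem.List.pyRange 0 (q : Int) 1).flatMap
          (fun b => if PySem.Int.mod b 2 = 0 then PySem.List.pyRange 0 pp 1 else (PySem.List.pyRange 0 pp 1).reverse))) 0
      = (PySem.List.pyRange 0 ((q : Int) * pp) 1).map (fun i => (i, vrank pp i)) := by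
  intro q
  induction q with
  | zero => simp [PySem.List.enumerate_nil, PySem.List.pyRange_one_eq_nil]
  | succ k ih =>
    have hq1 : ((k + 1 : Nat) : Int) = (k : Int) + 1 := by push_cast; omega
    rw [hq1, PySem.List.pyRange_one_succ_right (Int.natCast_nonneg k), List.flatMap_append,
        PySem.List.enumerate_append, ih]
    have hlenL : (((PySem.List.pyRange 0 (k : Int) 1).flatMap
          (fun b => if PySem.Int.mod b 2 = 0 then PySem.List.pyRange 0 pp 1 else (PySem.List.pyRange 0 pp 1).reverse))).length
        = ((k : Int) * pp).toNat := by
      have := congrArg List.length ih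
      simpa [PySem.List.length_enumerate, PySem.List.length_pyRange_one] using this
    rw [hlenL]
    have hcast : ((((k : Int) * pp).toNat : Int)) = (k : Int) * pp := by
      have : (0:Int) ≤ (k : Int) * pp := mul_nonneg (Int.natCast_nonneg k) (by omega)
      omega
    have hmod : PySem.Int.mod (k : Int) 2 = (k : Int) % 2 := PySem.Int.mod_eq_emod_of_pos (by omega)
    simp only [List.flatMap_cons, List.flatMap_nil, List.append_nil, hmod]
    rw [show (0 : Int) + (((k : Int) * pp).toNat : Int) = (k : Int) * pp by omega]
    rw [blockenum pp (k : Int) hpp]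
    rw [← List.map_append, ← PySem.List.pyRange_one_append 0 ((k : Int) * pp) ((k:Int) * pp + pp) (mul_nonneg (Int.natCast_nonneg k) (by omega)) (by omega)]
    congr 1
    ring_nf

-- dict(pairs) with strictly increasing (hence nodup) keys: items = pairs
lemma items_dict_enumerate (ranks : List Int) :
    ((PySem.List.enumerate ranks 0).foldl
        (fun (d : PySem.Dict Int Int) p => d.insert p.1 p.2) PySem.Dict.empty).items
      = PySem.List.enumerate ranks 0 := by
  have h := PySem.Dict.items_foldl_insert_fresh (PySem.List.enumerate ranks 0)
      (fun p => p.1) (fun p => p.2) PySem.Dict.empty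
      (fun a _ => PySem.Dict.contains_empty a.1)
      (by rw [show ((PySem.List.enumerate ranks 0).map (fun p => p.1)) = (PySem.List.enumerate ranks 0).map (·.1) from rfl,
              PySem.List.map_fst_enumerate]
          exact PySem.List.nodup_pyRange_one _ _)
  simpa using h

-- ===== VERDICT (by name: the statement is the Claim_ definition above) =====
theorem generate_stage_to_rank_mapping_spec : Claim_equal_generate_stage_to_rank_mapping := by
  intro pp ns style _ hpre
  unfold Spec_generate_stage_to_rank_mapping generate_stage_to_rank_mapping generate_stage_to_rank_mapping_alt
  rcases hpre with ⟨hst, _⟩ | ⟨hst, hpp0, hdiv, hcase⟩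
  · -- loop style: the insert loop over fresh distinct keys is the map
    subst hst
    simp only [String.reduceEq, reduceIte]
    rw [PySem.Dict.items_foldl_insert_fresh (PySem.List.pyRange 0 ns) (fun i => i)
        (fun i => PySem.Int.mod i pp) PySem.Dict.empty
        (fun a _ => PySem.Dict.contains_empty a)
        (by simpa using PySem.List.nodup_pyRange_one 0 ns)]
    simp [PySem.Dict.empty]
  · -- v style
    subst hst
    simp only [String.reduceEq, reduceIte]
    rw [if_neg (by simp [hdiv]), if_neg (by simp [hdiv])]
    by_cases hns0 : ns ≤ 0
    · -- no stages: both sides are the empty dict's items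
      rw [PySem.List.pyRange_one_eq_nil hns0]
      have hranks : ((PySem.List.pyRange 0 (PySem.Int.floordiv ns pp) 1).foldl
          (fun (acc : List Int) b => acc ++ (if PySem.Int.mod b 2 = 0 then PySem.List.pyRange 0 pp 1 else (PySem.List.pyRange 0 pp 1).reverse)) []) = [] := by
        by_cases hpp : 0 < pp
        · have hq : PySem.Int.floordiv ns pp ≤ 0 := by
            rw [PySem.Int.floordiv_eq_ediv_of_pos hpp]
            have h1 : ns / pp ≤ 0 / pp := Int.ediv_le_ediv hpp hns0
            simpa using h1
          rw [PySem.List.pyRange_one_eq_nil hq]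
          rfl
        · have hfwd : PySem.List.pyRange 0 pp 1 = [] := PySem.List.pyRange_one_eq_nil (by omega)
          rw [hfwd, PySem.List.foldl_append_eq_flatMap]
          simp
      rw [hranks]
      simp [PySem.List.enumerate_nil, PySem.Dict.empty]
    · -- 0 < ns, hence 0 < pp
      have hpp : 0 < pp := by rcases hcase with h | h <;> omega
      have hmod0 : ns % pp = 0 := by rw [← PySem.Int.mod_eq_emod_of_pos hpp]; exact hdiv
      have hqdef : PySem.Int.floordiv ns pp = ns / pp := PySem.Int.floordiv_eq_ediv_of_pos hpp
      have hdivmod := Int.mul_ediv_add_emod ns pp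
      have hcomm : pp * (ns / pp) = (ns / pp) * pp := Int.mul_comm _ _
      have hnseq : ns = (ns / pp) * pp := by omega
      have hq0 : 0 ≤ ns / pp := Int.ediv_nonneg (by omega) (by omega)
      set qn : Nat := (ns / pp).toNat with hqn
      have hqcast : ((qn : Nat) : Int) = ns / pp := by omega
      -- B side
      rw [items_dict_enumerate, hqdef, ← hqcast, PySem.List.foldl_append_eq_flatMap, List.nil_append,
          benum pp hpp qn]
      have hqnpp : ((qn : Nat) : Int) * pp = ns := by rw [hqcast]; omega
      rw [hqnpp]
      -- A side
      have h0 : (0 : Int) + (ns.toNat : Nat) = ns := by omega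
      have hv0 : vrank pp 0 = 0 := by unfold vrank; simp
      have h := vfold pp hpp ns.toNat 0 (le_refl 0) PySem.Dict.empty
          (fun j _ => PySem.Dict.contains_empty j)
      rw [h0, hv0] at h
      rw [h]
      have hemp : (PySem.Dict.empty : PySem.Dict Int Int).items = [] := rfl
      rw [hemp, List.nil_append]
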